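-- pv_equiv track=rewrite | github.com/cirosantilli/project-euler-solvers | solvers/321.py | solve
-- ===== SOURCE A (Python) =====
-- def solve(num_values=40):
--     if num_values <= 0:
--         return 0
--
--     x1, y1 = 2, 1
--     x2, y2 = 5, 3
--     total = y1 + y2
--
--     n = 3
--     while n <= num_values:
--         p, q, k = 3, 4, 5
--         r, s, l = 2, 3, 3
--
--         next_x1 = p * x1 + q * y1 + k
--         next_y1 = r * x1 + s * y1 + l
--         x1, y1 = next_x1, next_y1
--         total += y1
--
--         n += 1
--         if n > num_values:
--             break
--
--         next_x2 = p * x2 + q * y2 + k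
--         next_y2 = r * x2 + s * y2 + l
--         x2, y2 = next_x2, next_y2
--         total += y2
--
--         n += 1
--
--     return total
-- ===== SOURCE B (Python) =====
-- def solve(num_values=40):
--     if num_values <= 0:
--         return 0
--     a, b, c, d = 1, 3, 10, 22
--     total = sum([a, b, c, d][:num_values])
--     for _ in range(num_values - 4):
--         e = 6 * c - a + 4
--         total += e
--         a, b, c, d = b, c, d, e
--     return total
-- ===== Notes on version B (the rewrite author's own statement) =====
-- stated objective: alternative
-- what changed: Instead of advancing two interleaved two-dimensional affine state pairs (x,y) with four multiplications per term, B derives a single scalar stride-two linear recurrence on the y-values alone and iterates it over a sliding four-term window with one multiplication per term.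
-- intended difference: For num_values = 1 A returns 4 (it unconditionally seeds total with both initial y-values before checking the count) while B returns 1, the sum of the first one term, which is the intended value. — e.g. on solve(1): A returns 4, B returns 1
import Mathlib
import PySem

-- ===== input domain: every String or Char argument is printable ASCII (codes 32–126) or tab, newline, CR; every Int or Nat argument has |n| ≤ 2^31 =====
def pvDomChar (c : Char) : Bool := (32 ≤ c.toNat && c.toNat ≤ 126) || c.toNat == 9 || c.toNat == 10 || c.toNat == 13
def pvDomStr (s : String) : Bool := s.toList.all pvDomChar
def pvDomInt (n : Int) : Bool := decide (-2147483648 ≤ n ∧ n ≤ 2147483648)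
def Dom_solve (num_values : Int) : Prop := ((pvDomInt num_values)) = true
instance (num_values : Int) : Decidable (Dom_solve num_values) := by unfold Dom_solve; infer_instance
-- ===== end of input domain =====

-- B replaces A's two interleaved 2-D affine state pairs by a single scalar stride-two linear
-- recurrence on the y-values alone, iterated over a sliding four-term window.

-- ===== PORT A =====
-- A's while loop, step for step; fuel num_values.toNat is generous (n advances by 2 per iteration from 3).
def solveLoop (fuel : Nat) (x1 y1 x2 y2 total n num : Int) : Int :=
  match fuel with
  | 0 => total
  | fuel + 1 =>
    if n > num then total
    else
      let next_x1 := 3 * x1 + 4 * y1 + 5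
      let next_y1 := 2 * x1 + 3 * y1 + 3
      let total1 := total + next_y1
      let n1 := n + 1
      if n1 > num then total1
      else
        let next_x2 := 3 * x2 + 4 * y2 + 5
        let next_y2 := 2 * x2 + 3 * y2 + 3
        solveLoop fuel next_x1 next_y1 next_x2 next_y2 (total1 + next_y2) (n1 + 1) num

def solve (num_values : Int) : Int :=
  if num_values ≤ 0 then 0
  else solveLoop num_values.toNat 2 1 5 3 (1 + 3) 3 num_values

-- ===== PORT B =====
-- B's for loop over range(num_values - 4), sliding window (a,b,c,d) of the last four terms.
def altLoop (k : Nat) (a b c d total : Int) : Int :=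
  match k with
  | 0 => total
  | k + 1 =>
    let e := 6 * c - a + 4
    altLoop k b c d e (total + e)

-- sum([1,3,10,22][:num_values]): here num_values ≥ 1, so the slice is List.take num_values.toNat (exact).
def solve_alt (num_values : Int) : Int :=
  if num_values ≤ 0 then 0
  else
    let total := (([1, 3, 10, 22] : List Int).take num_values.toNat).sum
    altLoop (num_values - 4).toNat 1 3 10 22 total

-- ===== PRECONDITION & SPEC =====
-- For num_values = 1 A returns 4 (it unconditionally seeds total with both initial y-values before
-- checking the count) while B returns 1, the sum of the first one term, which is the intended value.
def D_solve (num_values : Int) : Prop := num_values = 1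
instance (num_values : Int) : Decidable (D_solve num_values) := by unfold D_solve; infer_instance
def Spec_solve (num_values : Int) (out : Int) : Prop := ¬ D_solve num_values → out = solve_alt num_values
instance (num_values : Int) (out : Int) : Decidable (Spec_solve num_values out) := by unfold Spec_solve; infer_instance
def pvDiffWitness_solve : Int := 1
def pvDiffWitnessOut_solve : Int × Int := (4, 1)

-- ===== CLAIM (what is proved, stated in full; the proofs are below) =====
def Claim_unchanged_solve : Prop := ∀ (num_values : Int), Dom_solve num_values → Spec_solve num_values (solve num_values)
def Claim_changed_solve : Prop := Dom_solve (pvDiffWitness_solve) ∧ D_solve (pvDiffWitness_solve) ∧ solve (pvDiffWitness_solve) = pvDiffWitnessOut_solve.1 ∧ solve_alt (pvDiffWitness_solve) = pvDiffWitnessOut_solve.2 ∧ pvDiffWitnessOut_solve.1 ≠ pvDiffWitnessOut_solve.2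
def Claim_exact_solve : Prop := ∀ (num_values : Int), Dom_solve num_values → D_solve num_values → solve num_values ≠ solve_alt num_values

-- ===== LEMMAS AND PROOFS =====

-- Invariant: A's pair states (x1,y1),(x2,y2) relate to B's window (a,b,y1,y2) by 2*x = 3*y - prev + 1.
theorem loop_eq (fuel : Nat) :
    ∀ (x1 y1 x2 y2 a b total n num : Int),
      num < n + 2 * (fuel : Int) →
      2 * x1 = 3 * y1 - a + 1 →
      2 * x2 = 3 * y2 - b + 1 →
      solveLoop fuel x1 y1 x2 y2 total n num = altLoop (num - n + 1).toNat a b y1 y2 total := by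
  induction fuel with
  | zero =>
    intro x1 y1 x2 y2 a b total n num hf h1 h2
    have : (num - n + 1).toNat = 0 := by omega
    simp [solveLoop, altLoop, this]
  | succ f ih =>
    intro x1 y1 x2 y2 a b total n num hf h1 h2
    by_cases hn : n > num
    · have : (num - n + 1).toNat = 0 := by omega
      simp [solveLoop, altLoop, this, hn]
    · simp only [solveLoop, if_neg hn]
      have he1 : 2 * x1 + 3 * y1 + 3 = 6 * y1 - a + 4 := by omega
      by_cases hn1 : n + 1 > num
      · -- one term left
        have hk : (num - n + 1).toNat = 1 := by omega
        simp only [hk, altLoop, if_pos hn1]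
        omega
      · simp only [if_neg hn1]
        have hk : ∃ k : Nat, (num - n + 1).toNat = k + 2 ∧ (num - (n + 1 + 1) + 1).toNat = k := by
          refine ⟨(num - n - 1).toNat, by omega, by omega⟩
        obtain ⟨k, hk2, hk0⟩ := hk
        have he2 : 2 * x2 + 3 * y2 + 3 = 6 * y2 - b + 4 := by omega
        rw [ih (3 * x1 + 4 * y1 + 5) (2 * x1 + 3 * y1 + 3) (3 * x2 + 4 * y2 + 5)
              (2 * x2 + 3 * y2 + 3) y1 y2
              (total + (2 * x1 + 3 * y1 + 3) + (2 * x2 + 3 * y2 + 3)) (n + 1 + 1) num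
              (by omega) (by omega) (by omega)]
        rw [hk2]
        simp only [altLoop]
        rw [hk0]
        congr 1; omega

theorem solve_eq_altLoop (num : Int) (h : 1 ≤ num) :
    solve num = altLoop (num - 2).toNat 0 0 1 3 4 := by
  unfold solve
  rw [if_neg (by omega)]
  rw [loop_eq num.toNat 2 1 5 3 0 0 (1 + 3) 3 num (by omega) (by omega) (by omega)]
  have : (num - 3 + 1).toNat = (num - 2).toNat := by omega
  rw [this]
  norm_num

-- ===== VERDICT (by name: the statement is the Claim_ definition above) =====
theorem solve_spec : Claim_unchanged_solve := by
  intro num hdom hD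
  by_cases h0 : num ≤ 0
  · simp [solve, solve_alt, h0]
  · rw [solve_eq_altLoop num (by omega)]
    by_cases h4 : 4 ≤ num
    · -- unfold two altLoop steps on the A side and align with B
      have hk : ∃ k : Nat, (num - 2).toNat = k + 2 ∧ (num - 4).toNat = k := by
        refine ⟨(num - 4).toNat, by omega, rfl⟩
      obtain ⟨k, hk2, hk4⟩ := hk
      have ht : (([1, 3, 10, 22] : List Int).take num.toNat).sum = 36 := by
        have : ∃ m : Nat, num.toNat = m + 4 := ⟨(num - 4).toNat, by omega⟩
        obtain ⟨m, hm⟩ := this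
        simp [hm, List.take]
      unfold solve_alt
      rw [if_neg (by omega), ht, hk2, ← hk4]
      simp only [altLoop]
      norm_num
    · -- num ∈ {2, 3} (num = 1 is excluded by D_)
      interval_cases num
      · exact absurd (by unfold D_solve; rfl) hD
      · decide
      · decide

theorem solve_changed : Claim_changed_solve := by unfold Claim_changed_solve; decide

theorem solve_tight : Claim_exact_solve := by
  intro num _ hD
  unfold D_solve at hD
  subst hD
  decide
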